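-- pv_equiv track=rewrite | github.com/Pampipampupampa/Cours-Python | Course/Book/Programmer_avec_Python3/10-StructureDonnees/objectListe.py | tableMulti
-- ===== SOURCE A (Python) =====
-- def tableMulti(table=1, nombre=10):
-- 	"""Renvoi n termes de la table de multiplication par m"""
-- 	i = 1
-- 	liste = []
-- 	while i <= nombre:
-- 		table = table * i
-- 		liste.append(table)
-- 		i += 1
-- 	return liste
-- ===== SOURCE B (Python) =====
-- from math import factorial
--
-- def tableMulti(table=1, nombre=10):
--     """Each element computed independently: element i is table * i!."""
--     return [table * factorial(i) for i in range(1, nombre + 1)]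
-- ===== Notes on version B (the rewrite author's own statement) =====
-- stated objective: alternative
-- what changed: Replaced the stateful while-loop with a running product accumulator by a stateless comprehension over range(1, nombre+1) that computes each element independently from the closed form table * factorial(i).
import Mathlib
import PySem

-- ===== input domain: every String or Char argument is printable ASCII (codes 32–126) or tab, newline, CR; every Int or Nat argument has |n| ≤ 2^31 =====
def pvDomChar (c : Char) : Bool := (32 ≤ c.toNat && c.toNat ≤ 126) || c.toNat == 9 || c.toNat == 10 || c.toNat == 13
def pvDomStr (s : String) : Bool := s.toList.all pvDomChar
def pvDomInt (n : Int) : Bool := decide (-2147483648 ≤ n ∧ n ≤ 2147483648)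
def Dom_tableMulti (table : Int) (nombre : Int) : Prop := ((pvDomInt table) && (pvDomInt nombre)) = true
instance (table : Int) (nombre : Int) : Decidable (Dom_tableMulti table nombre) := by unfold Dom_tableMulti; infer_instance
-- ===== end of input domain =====

-- B replaces A's stateful while-loop accumulator by a stateless map over range(1, nombre+1) computing table * i! per element (alternative decomposition, same cost).


-- ===== PORT A =====
-- while i <= nombre: table = table * i; liste.append(table); i += 1
def tmGo (table : Int) (i : Int) (nombre : Int) : List Int :=
  if i ≤ nombre then
    (table * i) :: tmGo (table * i) (i + 1) nombre
  else []
termination_by (nombre + 1 - i).toNat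
decreasing_by omega

def tableMulti (table : Int) (nombre : Int) : List Int := tmGo table 1 nombre

-- ===== PORT B =====
-- [table * factorial(i) for i in range(1, nombre + 1)]
def tableMulti_alt (table : Int) (nombre : Int) : List Int :=
  (PySem.List.pyRange 1 (nombre + 1)).map (fun i => table * (i.toNat.factorial : Int))

-- ===== PRECONDITION & SPEC =====
def Spec_tableMulti (table : Int) (nombre : Int) (out : List Int) : Prop := out = tableMulti_alt table nombre
instance (table : Int) (nombre : Int) (out : List Int) : Decidable (Spec_tableMulti table nombre out) := by unfold Spec_tableMulti; infer_instance

-- ===== CLAIM (what is proved, stated in full; the proofs are below) =====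
def Claim_equal_tableMulti : Prop := ∀ (table : Int) (nombre : Int), Dom_tableMulti table nombre → Spec_tableMulti table nombre (tableMulti table nombre)

-- ===== LEMMAS AND PROOFS =====
-- Invariant: when A's accumulator holds table * (i-1)!, the remaining loop of A
-- produces exactly the map of table * j! over the remaining range j = i, …, nombre.
theorem tmGo_eq_map (nombre : Int) : ∀ (k : Nat) (i table : Int), 1 ≤ i →
    (nombre + 1 - i).toNat = k →
    tmGo (table * ((i - 1).toNat.factorial : Int)) i nombre
      = (PySem.List.pyRange i (nombre + 1)).map (fun j => table * (j.toNat.factorial : Int)) := by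
  intro k
  induction k with
  | zero =>
      intro i table hi hk
      have hle : ¬ i ≤ nombre := by omega
      have hz : (nombre + 1 - i).toNat = 0 := hk
      rw [tmGo, if_neg hle, PySem.List.pyRange_one, hz]
      simp
  | succ k ih =>
      intro i table hi hk
      by_cases hle : i ≤ nombre
      · have hlt : i < nombre + 1 := by omega
        rw [tmGo, if_pos hle, PySem.List.pyRange_one_cons hlt, List.map_cons]
        have hfac : (i.toNat.factorial : Int) = ((i - 1).toNat.factorial : Int) * i := by
          have h1 : i.toNat = (i - 1).toNat + 1 := by omega
          have h3 : (((i - 1).toNat : Int)) + 1 = i := by omega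
          rw [h1, Nat.factorial_succ]
          push_cast
          rw [h3]
          ring
        have hhead : table * ((i - 1).toNat.factorial : Int) * i = table * (i.toNat.factorial : Int) := by
          rw [hfac]; ring
        have htail := ih (i + 1) table (by omega) (by omega)
        have harg : table * (((i + 1) - 1).toNat.factorial : Int)
            = table * ((i - 1).toNat.factorial : Int) * i := by
          have h4 : (i + 1) - 1 = i := by ring
          rw [h4, hfac]; ring
        rw [harg] at htail
        rw [hhead] at htail ⊢
        rw [htail]
      · have hz : (nombre + 1 - i).toNat = 0 := by omega
        rw [tmGo, if_neg hle, PySem.List.pyRange_one, hz]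
        simp

-- ===== VERDICT (by name: the statement is the Claim_ definition above) =====
theorem tableMulti_spec : Claim_equal_tableMulti := by
  intro table nombre _
  unfold Spec_tableMulti tableMulti tableMulti_alt
  have h := tmGo_eq_map nombre (nombre + 1 - 1).toNat 1 table (by omega) rfl
  simpa using h
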